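-- pv_equiv track=rewrite | github.com/aleef2540/backend_ai | app/modules/ai_custom/flow.py | find_course_by_topic
-- ===== SOURCE A (Python) =====
-- def find_course_by_topic(course_data, topic: str):
--     topic_clean = str(topic or "").strip().lower()
--
--     if not topic_clean or topic_clean == "unknown":
--         return None
--
--     for row in course_data:
--         course_name = str(row.get("course_name") or "").strip()
--         if course_name.lower() == topic_clean:
--             return row
--
--     for row in course_data:
--         course_name = str(row.get("course_name") or "").strip().lower()
--         if topic_clean in course_name or course_name in topic_clean:
--             return row
--
--     return None
-- ===== SOURCE B (Python) =====
-- def find_course_by_topic(course_data, topic: str):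
--     # Single pass: return immediately on the first exact match; remember the
--     # first substring match as a fallback returned after the loop.
--     topic_clean = str(topic or "").strip().lower()
--
--     if not topic_clean or topic_clean == "unknown":
--         return None
--
--     candidate = None
--     for row in course_data:
--         name = str(row.get("course_name") or "").strip().lower()
--         if name == topic_clean:
--             return row
--         if candidate is None and (topic_clean in name or name in topic_clean):
--             candidate = row
--     return candidate
-- ===== Notes on version B (the rewrite author's own statement) =====
-- stated objective: alternative
-- what changed: Replaces A's two full scans (first for an exact match, then a second pass for a substring match) with a single pass that returns on the first exact match and holds the first substring hit as a fallback returned after the loop.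
import Mathlib
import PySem

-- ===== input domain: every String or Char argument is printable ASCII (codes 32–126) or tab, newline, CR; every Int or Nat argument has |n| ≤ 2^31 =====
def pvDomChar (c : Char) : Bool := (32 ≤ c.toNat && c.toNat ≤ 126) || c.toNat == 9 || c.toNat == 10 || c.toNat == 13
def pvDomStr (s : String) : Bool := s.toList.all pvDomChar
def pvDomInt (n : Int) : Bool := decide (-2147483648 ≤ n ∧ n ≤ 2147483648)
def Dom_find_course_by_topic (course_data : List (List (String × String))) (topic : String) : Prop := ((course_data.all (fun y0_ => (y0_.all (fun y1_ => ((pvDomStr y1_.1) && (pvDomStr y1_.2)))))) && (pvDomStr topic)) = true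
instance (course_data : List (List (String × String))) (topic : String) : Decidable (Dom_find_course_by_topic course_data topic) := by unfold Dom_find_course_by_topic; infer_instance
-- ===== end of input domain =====

-- B changes the decomposition (one pass with a held fallback instead of A's two scans); same O(n) cost.

-- ===== PORT A =====
-- str(row.get("course_name") or ""): missing key or empty value both give ""
def pvRowName (row : List (String × String)) : String :=
  ((PySem.Dict.mk row).get? "course_name").getD ""

-- first loop of A: first row whose stripped name, lowered, equals topic_clean
def pvLoopExact (tc : String) : List (List (String × String)) → Option (List (String × String))
  | [] => none
  | row :: rest =>
    let course_name := PySem.Str.strip (pvRowName row)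
    if PySem.Str.lower course_name = tc then some row else pvLoopExact tc rest

-- second loop of A: first row whose cleaned name contains / is contained in topic_clean
def pvLoopSub (tc : String) : List (List (String × String)) → Option (List (String × String))
  | [] => none
  | row :: rest =>
    let course_name := PySem.Str.lower (PySem.Str.strip (pvRowName row))
    if PySem.Str.isIn tc course_name || PySem.Str.isIn course_name tc then some row
    else pvLoopSub tc rest

def find_course_by_topic (course_data : List (List (String × String))) (topic : String) : Option (List (String × String)) :=
  let topic_clean := PySem.Str.lower (PySem.Str.strip topic)
  if topic_clean = "" ∨ topic_clean = "unknown" then none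
  else
    match pvLoopExact topic_clean course_data with
    | some row => some row
    | none => pvLoopSub topic_clean course_data

-- ===== PORT B =====
-- single pass with a candidate accumulator
def pvLoopB (tc : String) (candidate : Option (List (String × String))) :
    List (List (String × String)) → Option (List (String × String))
  | [] => candidate
  | row :: rest =>
    let name := PySem.Str.lower (PySem.Str.strip (((PySem.Dict.mk row).get? "course_name").getD ""))
    if name = tc then some row
    else
      let candidate' :=
        if candidate.isNone && (PySem.Str.isIn tc name || PySem.Str.isIn name tc) then some row
        else candidate
      pvLoopB tc candidate' rest

def find_course_by_topic_alt (course_data : List (List (String × String))) (topic : String) : Option (List (String × String)) :=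
  let topic_clean := PySem.Str.lower (PySem.Str.strip topic)
  if topic_clean = "" ∨ topic_clean = "unknown" then none
  else pvLoopB topic_clean none course_data

-- ===== PRECONDITION & SPEC =====
def Spec_find_course_by_topic (course_data : List (List (String × String))) (topic : String) (out : Option (List (String × String))) : Prop := out = find_course_by_topic_alt course_data topic
instance (course_data : List (List (String × String))) (topic : String) (out : Option (List (String × String))) : Decidable (Spec_find_course_by_topic course_data topic out) := by unfold Spec_find_course_by_topic; infer_instance

-- ===== CLAIM (what is proved, stated in full; the proofs are below) =====
def Claim_equal_find_course_by_topic : Prop := ∀ (course_data : List (List (String × String))) (topic : String), Dom_find_course_by_topic course_data topic → Spec_find_course_by_topic course_data topic (find_course_by_topic course_data topic)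

-- ===== LEMMAS AND PROOFS =====
-- loop invariant: B's single pass computes "first exact, else held candidate, else first substring"
theorem pvLoopB_eq (tc : String) (cand : Option (List (String × String)))
    (rows : List (List (String × String))) :
    pvLoopB tc cand rows =
      match pvLoopExact tc rows with
      | some r => some r
      | none => match cand with
        | some c => some c
        | none => pvLoopSub tc rows := by
  induction rows generalizing cand with
  | nil => cases cand <;> simp [pvLoopB, pvLoopExact, pvLoopSub]
  | cons row rest ih =>
    simp only [pvLoopB, pvLoopExact, pvLoopSub, pvRowName]
    by_cases hx : PySem.Str.lower (PySem.Str.strip (((PySem.Dict.mk row).get? "course_name").getD "")) = tc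
    · simp [hx]
    · simp only [hx, if_false, ih]
      cases cand with
      | some c => simp
      | none =>
        cases pvLoopExact tc rest with
        | some r => simp
        | none => simp only [Option.isNone_none, Bool.true_and]; split_ifs <;> simp

-- ===== VERDICT (by name: the statement is the Claim_ definition above) =====
theorem find_course_by_topic_spec : Claim_equal_find_course_by_topic := by
  intro course_data topic _
  unfold Spec_find_course_by_topic find_course_by_topic find_course_by_topic_alt
  by_cases h : PySem.Str.lower (PySem.Str.strip topic) = "" ∨ PySem.Str.lower (PySem.Str.strip topic) = "unknown"
  · simp [h]
  · simp only [h, if_false, pvLoopB_eq]
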